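-- pv_equiv track=rewrite | github.com/jak1841/nand_2_tetris_REVISTED | syntax_analayzer.py | handle_identifier_tokenizer
-- ===== SOURCE A (Python) =====
-- def handle_identifier_tokenizer(string, curr_index):
--     curr_token = ""
--     while (curr_index < len(string) and string[curr_index] in "abcdefghijklmnopqrstuvwxyzABCDEFGHIJKLMNOPQRSTUVWXYZ0123456789_"):
--         curr_token+= string[curr_index]
--
--         curr_index+=1
--
--     # returns keyword instead if it is a keyword
--     keyword = ["class", "constructor", "function", "method", "field",
--                "static", "var", "int", "char", "boolean", "void", "true",
--                "false", "null", "this", "let", "do", "if", "else", "while", "return"]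
--     if (curr_token in keyword):
--         return (("keyword", curr_token), curr_index)
--
--     return (("identifier", curr_token), curr_index)
-- ===== SOURCE B (Python) =====
-- _IDENT_CHARS = frozenset("abcdefghijklmnopqrstuvwxyzABCDEFGHIJKLMNOPQRSTUVWXYZ0123456789_")
-- _KEYWORDS = frozenset(["class", "constructor", "function", "method", "field",
--                        "static", "var", "int", "char", "boolean", "void", "true",
--                        "false", "null", "this", "let", "do", "if", "else", "while", "return"])
--
-- def handle_identifier_tokenizer(string, curr_index):
--     rest = string[curr_index:]
--     k = next((i for i, c in enumerate(rest) if c not in _IDENT_CHARS), len(rest))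
--     tok = rest[:k]
--     kind = "keyword" if tok in _KEYWORDS else "identifier"
--     return ((kind, tok), curr_index + k)
-- ===== Notes on version B (the rewrite author's own statement) =====
-- stated objective: faster
-- what changed: B replaces A's per-character while-loop with string concatenation by slice-then-classify: take string[curr_index:], locate the first non-identifier character with enumerate/next, slice the token out in one step, and classify via a frozenset of keywords instead of a linear list scan.
-- intended difference: On negative curr_index (within range) where the wrapped-around suffix string[curr_index:] is all identifier characters and string[0] is an identifier character, A's negative-index wraparound continues reading from position 0 and returns a doubled token (suffix + prefix run) with a positive end index, while B returns just the suffix as the token with end index 0 — the intended 'scan forward from curr_index' behaviour. — e.g. on handle_identifier_tokenizer("aa", -1): A returns (("identifier", "aaa"), 2), B returns (("identifier", "a"), 0)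
import Mathlib
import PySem

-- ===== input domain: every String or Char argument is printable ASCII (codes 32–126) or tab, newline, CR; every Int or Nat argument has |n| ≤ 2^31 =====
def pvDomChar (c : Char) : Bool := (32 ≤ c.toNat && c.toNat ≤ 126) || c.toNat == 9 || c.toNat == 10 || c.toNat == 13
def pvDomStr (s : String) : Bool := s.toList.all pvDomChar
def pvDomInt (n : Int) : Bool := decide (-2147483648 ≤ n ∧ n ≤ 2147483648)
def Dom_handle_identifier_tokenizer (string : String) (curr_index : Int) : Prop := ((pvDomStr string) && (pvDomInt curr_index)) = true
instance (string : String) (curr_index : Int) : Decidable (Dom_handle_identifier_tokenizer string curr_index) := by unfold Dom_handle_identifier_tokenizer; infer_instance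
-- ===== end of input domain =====

-- B rewrites A's per-character accumulation loop as slice + first-non-identifier index + slice (idiomatic); return-value equivalence, no mutation involved.

-- ===== PORT A =====
def identChars : List Char :=
  "abcdefghijklmnopqrstuvwxyzABCDEFGHIJKLMNOPQRSTUVWXYZ0123456789_".toList

def kwList : List String :=
  ["class", "constructor", "function", "method", "field",
   "static", "var", "int", "char", "boolean", "void", "true",
   "false", "null", "this", "let", "do", "if", "else", "while", "return"]

-- A's while-loop: accumulate characters while string[curr_index] is an identifier char.
-- (when pyGet? is none Python raises IndexError; those inputs are outside Pre_)
def aLoop (s : List Char) : Nat → Int → List Char → List Char × Int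
  | 0, i, tok => (tok, i)
  | fuel + 1, i, tok =>
    if i < (s.length : Int) then
      match PySem.List.pyGet? s i with
      | some c =>
        if identChars.contains c then aLoop s fuel (i + 1) (tok ++ [c]) else (tok, i)
      | none => (tok, i)
    else (tok, i)

def handle_identifier_tokenizer (string : String) (curr_index : Int) : (String × String) × Int :=
  let r := aLoop string.toList ((string.toList.length : Int) - curr_index).toNat curr_index []
  let tok := String.ofList r.1
  if tok ∈ kwList then (("keyword", tok), r.2) else (("identifier", tok), r.2)

-- ===== PORT B =====
def identSet : PySem.Set Char := PySem.Set.ofList identChars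
def kwSet : PySem.Set String := PySem.Set.ofList kwList

def handle_identifier_tokenizer_alt (string : String) (curr_index : Int) : (String × String) × Int :=
  let rest := PySem.List.slice string.toList (some curr_index) none
  let k : Int :=
    match (PySem.List.enumerate rest 0).find? (fun ic => !(PySem.Set.contains identSet ic.2)) with
    | some jc => jc.1
    | none => (rest.length : Int)
  let tok := String.ofList (PySem.List.slice rest none (some k))
  let kind := if PySem.Set.contains kwSet tok then "keyword" else "identifier"
  ((kind, tok), curr_index + k)

-- ===== PRECONDITION & SPEC =====
-- Pre_ excludes exactly the inputs where A raises IndexError: curr_index < -len(string)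
-- (the loop's negative index then falls off the front of the string).
def Pre_handle_identifier_tokenizer (string : String) (curr_index : Int) : Prop :=
  -(string.toList.length : Int) ≤ curr_index
instance (string : String) (curr_index : Int) : Decidable (Pre_handle_identifier_tokenizer string curr_index) := by unfold Pre_handle_identifier_tokenizer; infer_instance

def pvWitness_handle_identifier_tokenizer : String × Int := ("if x", 0)

-- On negative curr_index (within range) whose wrapped suffix is all identifier chars and whose
-- first character is an identifier char, A's negative-index wraparound re-reads from position 0
-- and returns a doubled token with a positive end index; B returns just the suffix token ending
-- at index 0, the intended "scan forward from curr_index" behaviour.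
def D_handle_identifier_tokenizer (string : String) (curr_index : Int) : Prop :=
  curr_index < 0 ∧
  (string.toList.drop ((string.toList.length : Int) + curr_index).toNat).all
    (fun c => identChars.contains c) = true ∧
  (match string.toList with
   | [] => False
   | c :: _ => identChars.contains c = true)
instance (string : String) (curr_index : Int) : Decidable (D_handle_identifier_tokenizer string curr_index) := by
  unfold D_handle_identifier_tokenizer
  cases string.toList <;> infer_instance

def Spec_handle_identifier_tokenizer (string : String) (curr_index : Int) (out : (String × String) × Int) : Prop :=
  ¬ D_handle_identifier_tokenizer string curr_index → out = handle_identifier_tokenizer_alt string curr_index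
instance (string : String) (curr_index : Int) (out : (String × String) × Int) : Decidable (Spec_handle_identifier_tokenizer string curr_index out) := by unfold Spec_handle_identifier_tokenizer; infer_instance

def pvDiffWitness_handle_identifier_tokenizer : String × Int := ("aa", -1)
def pvDiffWitnessOut_handle_identifier_tokenizer : ((String × String) × Int) × ((String × String) × Int) :=
  ((("identifier", "aaa"), 2), (("identifier", "a"), 0))

-- ===== CLAIM (what is proved, stated in full; the proofs are below) =====
def Claim_unchanged_handle_identifier_tokenizer : Prop := ∀ (string : String) (curr_index : Int), Dom_handle_identifier_tokenizer string curr_index → Pre_handle_identifier_tokenizer string curr_index → Spec_handle_identifier_tokenizer string curr_index (handle_identifier_tokenizer string curr_index)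
def Claim_changed_handle_identifier_tokenizer : Prop := Dom_handle_identifier_tokenizer (pvDiffWitness_handle_identifier_tokenizer.1) (pvDiffWitness_handle_identifier_tokenizer.2) ∧ Pre_handle_identifier_tokenizer (pvDiffWitness_handle_identifier_tokenizer.1) (pvDiffWitness_handle_identifier_tokenizer.2) ∧ D_handle_identifier_tokenizer (pvDiffWitness_handle_identifier_tokenizer.1) (pvDiffWitness_handle_identifier_tokenizer.2) ∧ handle_identifier_tokenizer (pvDiffWitness_handle_identifier_tokenizer.1) (pvDiffWitness_handle_identifier_tokenizer.2) = pvDiffWitnessOut_handle_identifier_tokenizer.1 ∧ handle_identifier_tokenizer_alt (pvDiffWitness_handle_identifier_tokenizer.1) (pvDiffWitness_handle_identifier_tokenizer.2) = pvDiffWitnessOut_handle_identifier_tokenizer.2 ∧ pvDiffWitnessOut_handle_identifier_tokenizer.1 ≠ pvDiffWitnessOut_handle_identifier_tokenizer.2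
def Claim_exact_handle_identifier_tokenizer : Prop := ∀ (string : String) (curr_index : Int), Dom_handle_identifier_tokenizer string curr_index → Pre_handle_identifier_tokenizer string curr_index → D_handle_identifier_tokenizer string curr_index → handle_identifier_tokenizer string curr_index ≠ handle_identifier_tokenizer_alt string curr_index

-- ===== LEMMAS AND PROOFS =====

theorem contains_identSet (c : Char) : PySem.Set.contains identSet c = identChars.contains c := by
  simp [identSet, PySem.Set.contains, PySem.Set.mem_ofList]

theorem contains_kwSet (t : String) : PySem.Set.contains kwSet t = kwList.contains t := by
  simp [kwSet, PySem.Set.contains, PySem.Set.mem_ofList]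

theorem drop_min {α : Type} (s : List α) (a : Nat) : s.drop (min a s.length) = s.drop a := by
  rcases le_total a s.length with h | h
  · rw [min_eq_left h]
  · rw [min_eq_right h, List.drop_length, List.drop_eq_nil_of_le h]

theorem aLoop_nonneg (s : List Char) (fuel : Nat) (i : Int) (tok : List Char) (h0 : 0 ≤ i)
    (hf : (s.length : Int) - i ≤ (fuel : Int)) :
    aLoop s fuel i tok =
      (tok ++ (s.drop i.toNat).takeWhile (fun c => identChars.contains c),
       i + ((s.drop i.toNat).takeWhile (fun c => identChars.contains c)).length) := by
  induction fuel generalizing i tok with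
  | zero =>
    have hge : s.length ≤ i.toNat := by omega
    rw [aLoop, List.drop_eq_nil_of_le hge]
    simp
  | succ fuel ih =>
    rw [aLoop]
    by_cases hi : i < (s.length : Int)
    · rw [if_pos hi]
      have h1 : i.toNat < s.length := by omega
      rw [PySem.List.pyGet?_eq_some_getElem s h0 hi]
      show (if identChars.contains s[i.toNat] = true then aLoop s fuel (i + 1) (tok ++ [s[i.toNat]]) else (tok, i)) = _
      have hdrop : s.drop i.toNat = s[i.toNat] :: s.drop (i.toNat + 1) :=
        List.drop_eq_getElem_cons h1
      by_cases hc : identChars.contains s[i.toNat] = true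
      · rw [if_pos hc]
        rw [ih (i + 1) (tok ++ [s[i.toNat]]) (by omega) (by omega)]
        have h2 : (i + 1).toNat = i.toNat + 1 := by omega
        rw [h2, hdrop, List.takeWhile_cons, if_pos hc]
        simp only [Prod.mk.injEq, List.length_cons]
        refine ⟨by simp, by push_cast; ring⟩
      · rw [if_neg hc]
        rw [hdrop, List.takeWhile_cons, if_neg hc]
        simp
    · rw [if_neg hi]
      have hge : s.length ≤ i.toNat := by omega
      rw [List.drop_eq_nil_of_le hge]
      simp

theorem aLoop_neg (s : List Char) (fuel : Nat) (i : Int) (tok : List Char)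
    (hlo : -(s.length : Int) ≤ i) (hneg : i < 0)
    (hf : (s.length : Int) - i ≤ (fuel : Int)) :
    aLoop s fuel i tok =
      (if ((s.drop ((s.length : Int) + i).toNat).takeWhile (fun c => identChars.contains c)).length
            < (s.drop ((s.length : Int) + i).toNat).length
       then (tok ++ (s.drop ((s.length : Int) + i).toNat).takeWhile (fun c => identChars.contains c),
             i + ((s.drop ((s.length : Int) + i).toNat).takeWhile (fun c => identChars.contains c)).length)
       else ((tok ++ s.drop ((s.length : Int) + i).toNat) ++ s.takeWhile (fun c => identChars.contains c),
             0 + (s.takeWhile (fun c => identChars.contains c)).length)) := by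
  induction fuel generalizing i tok with
  | zero => exfalso; omega
  | succ fuel ih =>
    have hi : i < (s.length : Int) := by omega
    have hplt : ((s.length : Int) + i).toNat < s.length := by omega
    rw [aLoop, if_pos hi]
    have hg : PySem.List.pyGet? s i = some s[((s.length : Int) + i).toNat] := by
      have hk1 : 0 < (-i).toNat := by omega
      have hk2 : (-i).toNat ≤ s.length := by omega
      have hieq : i = -(((-i).toNat : Nat) : Int) := by omega
      have h1 := PySem.List.pyGet?_neg_natCast (xs := s) (k := (-i).toNat) hk1 hk2
      rw [← hieq] at h1
      have hpe : s.length - (-i).toNat = ((s.length : Int) + i).toNat := by omega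
      rw [hpe] at h1
      rw [h1, List.getElem?_eq_getElem hplt]
    rw [hg]
    show (if identChars.contains s[((s.length : Int) + i).toNat] = true
          then aLoop s fuel (i + 1) (tok ++ [s[((s.length : Int) + i).toNat]]) else (tok, i)) = _
    have hdrop : s.drop ((s.length : Int) + i).toNat
        = s[((s.length : Int) + i).toNat] :: s.drop (((s.length : Int) + i).toNat + 1) :=
      List.drop_eq_getElem_cons hplt
    by_cases hc : identChars.contains s[((s.length : Int) + i).toNat] = true
    · rw [if_pos hc]
      by_cases hz : i + 1 = 0
      · -- i = -1 : next step continues from index 0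
        have hp1 : ((s.length : Int) + i).toNat + 1 = s.length := by omega
        rw [hz, aLoop_nonneg s fuel 0 _ le_rfl (by push_cast at hf ⊢; omega)]
        rw [hdrop, hp1, List.drop_length, List.takeWhile_cons, if_pos hc]
        simp [List.append_assoc]
      · have hneg' : i + 1 < 0 := by omega
        rw [ih (i + 1) (tok ++ [s[((s.length : Int) + i).toNat]]) (by omega) hneg'
            (by push_cast at hf ⊢; omega)]
        have hpe2 : ((s.length : Int) + (i + 1)).toNat = ((s.length : Int) + i).toNat + 1 := by omega
        rw [hpe2, hdrop, List.takeWhile_cons, if_pos hc]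
        by_cases hlt : (List.takeWhile (fun c => identChars.contains c) (s.drop (((s.length : Int) + i).toNat + 1))).length
            < (s.drop (((s.length : Int) + i).toNat + 1)).length
        · rw [if_pos hlt, if_pos (by simp only [List.length_cons]; omega)]
          simp only [Prod.mk.injEq, List.length_cons]
          refine ⟨by simp, by push_cast; ring⟩
        · rw [if_neg hlt, if_neg (by simp only [List.length_cons]; omega)]
          simp [List.append_assoc]
    · rw [if_neg hc]
      rw [hdrop, List.takeWhile_cons, if_neg hc]
      rw [if_pos (by simp; omega)]
      simp

theorem find_enum_eq (rest : List Char) (st : Int) :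
    (match (PySem.List.enumerate rest st).find? (fun ic => !(PySem.Set.contains identSet ic.2)) with
     | some jc => jc.1
     | none => st + (rest.length : Int)) =
    st + ((rest.takeWhile (fun c => identChars.contains c)).length : Int) := by
  have hpred : (fun ic : Int × Char => !(PySem.Set.contains identSet ic.2))
      = (fun ic : Int × Char => !(identChars.contains ic.2)) :=
    funext fun ic => by rw [contains_identSet]
  rw [hpred]
  induction rest generalizing st with
  | nil => simp [PySem.List.enumerate]
  | cons c cs ih =>
    rw [PySem.List.enumerate_cons, List.find?_cons, List.takeWhile_cons]
    cases hc : identChars.contains c with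
    | false => simp
    | true =>
      simp only [Bool.not_true]
      rw [if_pos trivial]
      have h2 := ih (st + 1)
      cases hfind : List.find? (fun ic : Int × Char => !(identChars.contains ic.2))
          (PySem.List.enumerate cs (st + 1)) with
      | none =>
        rw [hfind] at h2
        simp at h2 ⊢
        omega
      | some jc =>
        rw [hfind] at h2
        have h3 : jc.1
            = st + 1 + ((cs.takeWhile (fun c => identChars.contains c)).length : Int) := h2
        simp only [List.length_cons]
        push_cast
        omega

theorem alt_char (string : String) (curr_index : Int) :
    handle_identifier_tokenizer_alt string curr_index =
      (let rest := string.toList.drop (PySem.List.clampIdx string.toList.length curr_index)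
       let tw := rest.takeWhile (fun c => identChars.contains c)
       let tok := String.ofList tw
       ((if tok ∈ kwList then "keyword" else "identifier", tok), curr_index + tw.length)) := by
  unfold handle_identifier_tokenizer_alt
  rw [PySem.List.slice_some_none]
  have hfind := find_enum_eq (string.toList.drop (PySem.List.clampIdx string.toList.length curr_index)) 0
  rw [zero_add] at hfind
  have htake : ∀ (l : List Char),
      l.take (l.takeWhile (fun c => identChars.contains c)).length
        = l.takeWhile (fun c => identChars.contains c) := by
    intro l
    induction l with
    | nil => simp
    | cons c cs ih =>
      rw [List.takeWhile_cons]
      by_cases hc : identChars.contains c = true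
      · rw [if_pos hc, List.length_cons, List.take_succ_cons, ih]
      · rw [if_neg hc]
        simp
  have hkw : ∀ (tk : String),
      (if PySem.Set.contains kwSet tk = true then "keyword" else "identifier")
        = (if tk ∈ kwList then "keyword" else "identifier") := by
    intro tk
    rw [contains_kwSet]
    by_cases h : tk ∈ kwList
    · rw [if_pos (by simpa using h), if_pos h]
    · rw [if_neg (by simpa using h), if_neg h]
  cases hf : List.find? (fun ic : Int × Char => !(PySem.Set.contains identSet ic.2))
      (PySem.List.enumerate (string.toList.drop (PySem.List.clampIdx string.toList.length curr_index)) 0) with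
  | none =>
    rw [hf] at hfind
    simp only at hfind
    simp only [hf]
    rw [hfind]
    simp only [zero_add]
    rw [PySem.List.slice_to _ (by positivity), Int.toNat_natCast, htake]
    simp only [hkw]
  | some jc =>
    rw [hf] at hfind
    simp only at hfind
    simp only [hf]
    rw [hfind]
    simp only [zero_add]
    rw [PySem.List.slice_to _ (by positivity), Int.toNat_natCast, htake]
    simp only [hkw]

-- ===== VERDICT (by name: the statement is the Claim_ definition above) =====
theorem takeWhile_all_eq (l : List Char) (p : Char → Bool)
    (h : ∀ x ∈ l, p x = true) : l.takeWhile p = l := by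
  induction l with
  | nil => rfl
  | cons c cs ih =>
    rw [List.takeWhile_cons, if_pos (h c List.mem_cons_self)]
    rw [ih (fun x hx => h x (List.mem_cons_of_mem c hx))]

theorem handle_identifier_tokenizer_spec : Claim_unchanged_handle_identifier_tokenizer := by
  intro string ci hdom hpre hND
  rw [alt_char]
  unfold handle_identifier_tokenizer
  dsimp only
  by_cases h0 : 0 ≤ ci
  · rw [aLoop_nonneg string.toList _ ci [] h0 (by push_cast; omega)]
    have hdropeq : string.toList.drop (PySem.List.clampIdx string.toList.length ci)
        = string.toList.drop ci.toNat := by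
      have hcl : PySem.List.clampIdx string.toList.length ci = min ci.toNat string.toList.length := by
        unfold PySem.List.clampIdx; rw [if_neg (by omega)]
      rw [hcl, drop_min]
    rw [hdropeq]
    simp only [List.nil_append]
    by_cases hk : String.ofList ((string.toList.drop ci.toNat).takeWhile (fun c => identChars.contains c)) ∈ kwList
    · rw [if_pos hk, if_pos hk]
    · rw [if_neg hk, if_neg hk]
  · push_neg at h0
    have hpre' : -(string.toList.length : Int) ≤ ci := hpre
    rw [aLoop_neg string.toList _ ci [] hpre' h0 (by push_cast; omega)]
    have hcl : PySem.List.clampIdx string.toList.length ci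
        = ((string.toList.length : Int) + ci).toNat := by
      unfold PySem.List.clampIdx
      rw [if_pos h0, if_neg (by omega)]
    rw [hcl]
    by_cases hlt : ((string.toList.drop ((string.toList.length : Int) + ci).toNat).takeWhile
          (fun c => identChars.contains c)).length
        < (string.toList.drop ((string.toList.length : Int) + ci).toNat).length
    · rw [if_pos hlt]
      simp only [List.nil_append]
      by_cases hk : String.ofList ((string.toList.drop ((string.toList.length : Int) + ci).toNat).takeWhile
          (fun c => identChars.contains c)) ∈ kwList
      · rw [if_pos hk, if_pos hk]
      · rw [if_neg hk, if_neg hk]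
    · rw [if_neg hlt]
      have hle := (List.takeWhile_prefix (l := string.toList.drop ((string.toList.length : Int) + ci).toNat)
        (fun c => identChars.contains c)).length_le
      have hlen : ((string.toList.drop ((string.toList.length : Int) + ci).toNat).takeWhile
          (fun c => identChars.contains c)).length
          = (string.toList.drop ((string.toList.length : Int) + ci).toNat).length := by omega
      have hts : (string.toList.drop ((string.toList.length : Int) + ci).toNat).takeWhile
          (fun c => identChars.contains c)
          = string.toList.drop ((string.toList.length : Int) + ci).toNat :=
        List.IsPrefix.eq_of_length (List.takeWhile_prefix _) hlen
      have hall : (string.toList.drop ((string.toList.length : Int) + ci).toNat).all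
          (fun c => identChars.contains c) = true := by
        rw [List.all_eq_true]
        intro x hx
        rw [← hts] at hx
        exact List.mem_takeWhile_imp hx
      unfold D_handle_identifier_tokenizer at hND
      push_neg at hND
      have hhead := hND h0 hall
      cases hs : string.toList with
      | nil => exfalso; rw [hs] at hpre'; simp at hpre'; omega
      | cons c0 s' =>
        rw [hs] at hhead
        simp only at hhead
        have hc0 : identChars.contains c0 ≠ true := fun hh => hhead hh
        rw [hs] at hts
        rw [hs] at hpre'
        rw [List.takeWhile_cons, if_neg hc0]
        rw [hts]
        have hidx : ci + ((((c0 :: s').drop ((((c0 :: s').length : Int)) + ci).toNat).length : Int)) = 0 := by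
          rw [List.length_drop]
          push_cast
          omega
        simp only [List.append_nil, List.nil_append, List.length_nil, Nat.cast_zero, add_zero]
        rw [hidx]
        by_cases hk : String.ofList ((c0 :: s').drop (((c0 :: s').length : Int) + ci).toNat) ∈ kwList
        · rw [if_pos hk, if_pos hk]
        · rw [if_neg hk, if_neg hk]

set_option maxRecDepth 4000 in
theorem handle_identifier_tokenizer_changed : Claim_changed_handle_identifier_tokenizer := by
  unfold Claim_changed_handle_identifier_tokenizer; decide

theorem handle_identifier_tokenizer_tight : Claim_exact_handle_identifier_tokenizer := by
  intro string ci hdom hpre hD heq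
  unfold D_handle_identifier_tokenizer at hD
  obtain ⟨hneg, hall, hh⟩ := hD
  have hpre' : -(string.toList.length : Int) ≤ ci := hpre
  have hts : (string.toList.drop ((string.toList.length : Int) + ci).toNat).takeWhile
      (fun c => identChars.contains c)
      = string.toList.drop ((string.toList.length : Int) + ci).toNat :=
    takeWhile_all_eq _ _ (List.all_eq_true.mp hall)
  have hA : (handle_identifier_tokenizer string ci).2
      = 0 + ((string.toList.takeWhile (fun c => identChars.contains c)).length : Int) := by
    unfold handle_identifier_tokenizer
    dsimp only
    rw [aLoop_neg string.toList _ ci [] hpre' hneg (by push_cast; omega)]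
    rw [if_neg (show ¬(((string.toList.drop ((string.toList.length : Int) + ci).toNat).takeWhile
        (fun c => identChars.contains c)).length
        < (string.toList.drop ((string.toList.length : Int) + ci).toNat).length) from by
      rw [hts]; omega)]
    split_ifs <;> rfl
  have hB : (handle_identifier_tokenizer_alt string ci).2 = 0 := by
    rw [alt_char]
    dsimp only
    have hcl : PySem.List.clampIdx string.toList.length ci
        = ((string.toList.length : Int) + ci).toNat := by
      unfold PySem.List.clampIdx
      rw [if_pos hneg, if_neg (by omega)]
    rw [hcl, hts, List.length_drop]
    push_cast
    omega
  rw [heq, hB] at hA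
  cases hs : string.toList with
  | nil => rw [hs] at hh; exact hh
  | cons c0 s' =>
    rw [hs] at hh
    simp only at hh
    rw [hs, List.takeWhile_cons, if_pos hh, List.length_cons] at hA
    push_cast at hA
    omega
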